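-- pv_equiv track=rewrite | github.com/abelkm99/competitive_programming | 0417-pacific-atlantic-water-flow/0417-pacific-atlantic-water-flow.py | BFS
-- ===== SOURCE A (Python) =====
-- from typing import List
--
-- from collections import deque
--
-- def BFS(grid: List[List[int]], pos: list[tuple[int,int]]) -> list[list[int]]:
--     n, m = len(grid), len(grid[0])
--     visited = [[0 for _ in range(m)] for _ in range(n)]
--     v = [[0] * m] * n
--
--     def valid(i: int, j: int) -> bool:
--         return i >= 0 and i < n and j >= 0 and j < m
--
--
--
--     dq = deque(pos)
--     while dq:
--         i, j = dq.pop()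
--         if visited[i][j]: # continue if it is visited
--             continue
--         visited[i][j] = 1
--         for dx, dy in ((0, 1), (0, -1), (1, 0), (-1, 0)):
--             x, y = i + dx, j + dy
--             if valid(x, y) and grid[x][y] >= grid[i][j]:
--                 dq.append((x, y))
--     return visited
-- ===== SOURCE B (Python) =====
-- from typing import List
--
--
-- def BFS(grid: List[List[int]], pos: list[tuple[int, int]]) -> list[list[int]]:
--     # Per-source flood fill, level by level: sources are taken back to front
--     # by index (the order A's stack pops them); each one is expanded
--     # breadth-first, a cell being marked the moment it joins a level, so no
--     # cell is ever enqueued twice and nothing is re-checked afterwards.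
--     n, m = len(grid), len(grid[0])
--     visited = [[0] * m for _ in range(n)]
--     for k in range(len(pos) - 1, -1, -1):
--         si, sj = pos[k]
--         if visited[si][sj]:
--             continue
--         visited[si][sj] = 1
--         cur = [(si, sj)]
--         while cur:
--             nxt = []
--             for i, j in cur:
--                 h = grid[i][j]
--                 for x, y in ((i, j + 1), (i, j - 1), (i + 1, j), (i - 1, j)):
--                     if 0 <= x < n and 0 <= y < m and grid[x][y] >= h \
--                             and not visited[x][y]:
--                         visited[x][y] = 1
--                         nxt.append((x, y))
--             cur = nxt
--     return visited
-- ===== Notes on version B (the rewrite author's own statement) =====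
-- stated objective: alternative
-- what changed: A runs one LIFO worklist (deque used as a stack: cells pushed up to four times, duplicates re-popped, marked only on pop); B walks the sources back to front by index and expands each one level by level (a frontier list rebuilt per round, every cell marked the moment it is enqueued, candidate neighbours written as absolute coordinates), so no cell is ever enqueued twice; the final matrix is identical because the marked set is the order-independent reachability closure, which is what the Lean proof establishes.
-- outside the precondition, e.g. on BFS([[5, 0], [0]], [(0, 0)]): A returns [[1, 0], [0, 0]], B returns [[1, 0], [0, 0]]
import Mathlib
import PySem

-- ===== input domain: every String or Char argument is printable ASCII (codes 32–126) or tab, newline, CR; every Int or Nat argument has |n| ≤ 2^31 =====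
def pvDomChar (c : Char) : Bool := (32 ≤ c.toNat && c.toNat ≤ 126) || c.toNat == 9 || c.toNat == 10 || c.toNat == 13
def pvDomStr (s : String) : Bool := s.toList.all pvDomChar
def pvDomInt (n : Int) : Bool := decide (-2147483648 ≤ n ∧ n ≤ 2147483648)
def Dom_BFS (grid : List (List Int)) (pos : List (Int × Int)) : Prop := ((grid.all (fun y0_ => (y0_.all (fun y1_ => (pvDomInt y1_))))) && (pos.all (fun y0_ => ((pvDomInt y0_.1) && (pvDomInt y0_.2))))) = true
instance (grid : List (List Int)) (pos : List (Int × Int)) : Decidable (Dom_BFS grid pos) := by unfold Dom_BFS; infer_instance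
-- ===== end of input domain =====

-- B replaces A's single LIFO worklist (cells pushed repeatedly, marked on pop) by a per-source,
-- level-by-level frontier expansion (sources taken back to front by index, each cell marked when
-- enqueued); equal on Pre_, proved via an order-independence argument: both compute the same
-- reachability closure.

-- ===== PORT A =====

def dirs : List (Int × Int) := [(0, 1), (0, -1), (1, 0), (-1, 0)]

-- 'i >= 0 and i < n and j >= 0 and j < m'  (A's 'valid')
def validP (n m x y : Int) : Bool :=
  decide (0 ≤ x) && decide (x < n) && decide (0 ≤ y) && decide (y < m)

-- g[i][j] as Python computes it (negative wraparound; none = IndexError)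
def pyGet2? (g : List (List Int)) (i j : Int) : Option Int :=
  match PySem.List.pyGet? g i with
  | none => none
  | some row => PySem.List.pyGet? row j

-- 'g[i][j] = a'; exact whenever the matching read pyGet2? g i j succeeded (every use below
-- performs that read first, as the Python does)
def pySet2 (g : List (List Int)) (i j a : Int) : List (List Int) :=
  PySem.List.pySetD g i (PySem.List.pySetD (PySem.List.pyGetD g i []) j a)

-- number of unmarked cells, the ports' termination measure (not part of either Python)
def czRow (r : List Int) : Nat := r.countP (fun v => v == 0)
def cz (g : List (List Int)) : Nat := (g.map czRow).sum

theorem pyGet?_idx {α : Type} (xs : List α) (i : Int) (x : α)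
    (h : PySem.List.pyGet? xs i = some x) :
    ∃ k : Nat, PySem.List.pyIdx? xs.length i = some k ∧ xs[k]? = some x := by
  unfold PySem.List.pyGet? at h
  cases hk : PySem.List.pyIdx? xs.length i with
  | none => rw [hk] at h; simp at h
  | some k => rw [hk] at h; exact ⟨k, rfl, h⟩

theorem pySetD_idx {α : Type} (xs : List α) (i : Int) (v : α) (k : Nat)
    (h : PySem.List.pyIdx? xs.length i = some k) :
    PySem.List.pySetD xs i v = xs.set k v := by
  simp [PySem.List.pySetD, PySem.List.pySet?, h]

theorem pyGetD_idx {α : Type} (xs : List α) (i : Int) (d : α) (k : Nat)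
    (h : PySem.List.pyIdx? xs.length i = some k) :
    PySem.List.pyGetD xs i d = xs[k]?.getD d := by
  simp [PySem.List.pyGetD, PySem.List.pyGet?, h]

theorem czRow_set_lt (l : List Int) (k : Nat) (h : l[k]? = some 0) :
    czRow (l.set k 1) < czRow l := by
  induction l generalizing k with
  | nil => simp at h
  | cons a l ih =>
    cases k with
    | zero =>
      simp at h
      subst h
      have h1 : czRow ((0 : Int) :: l) = czRow l + 1 := by simp [czRow, List.countP_cons]
      have h2 : czRow ((1 : Int) :: l) = czRow l := by simp [czRow, List.countP_cons]
      simpa [h1, h2] using Nat.lt_succ_self _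
    | succ k =>
      simp at h
      have := ih k h
      have h1 : ∀ x : Int, ∀ t : List Int, czRow (x :: t) = czRow t + (if x = 0 then 1 else 0) := by
        intro x t; by_cases hx : x = 0 <;> simp [czRow, List.countP_cons, hx]
      simp only [List.set_cons_succ, h1]
      omega

theorem cz_set_lt (g : List (List Int)) (k : Nat) (row r : List Int)
    (h : g[k]? = some row) (h2 : czRow r < czRow row) : cz (g.set k r) < cz g := by
  induction g generalizing k with
  | nil => simp at h
  | cons a g ih =>
    cases k with
    | zero =>
      simp at h
      subst h
      simp [cz]
      omega
    | succ k =>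
      simp at h
      have := ih k h
      simp [cz] at *
      omega

-- marking a cell read as 0 strictly decreases the number of unmarked cells
theorem cz_mark_lt (v : List (List Int)) (i j : Int) (h : pyGet2? v i j = some 0) :
    cz (pySet2 v i j 1) < cz v := by
  unfold pyGet2? at h
  cases hg : PySem.List.pyGet? v i with
  | none => rw [hg] at h; simp at h
  | some row =>
    rw [hg] at h
    obtain ⟨k, hk, hvk⟩ := pyGet?_idx v i row hg
    obtain ⟨k2, hk2, hrk⟩ := pyGet?_idx row j 0 h
    unfold pySet2
    rw [pyGetD_idx v i [] k hk, hvk]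
    simp only [Option.getD_some]
    rw [pySetD_idx row j 1 k2 hk2, pySetD_idx v i _ k hk]
    exact cz_set_lt v k row _ hvk (czRow_set_lt row k2 hrk)

-- A's push loop: 'for dx, dy in dirs: if valid(x, y) and grid[x][y] >= grid[i][j]: dq.append((x, y))'
-- (grid reads use default 0: inside Pre_ they are always in range, as in the Python)
def pushNbrs (grid : List (List Int)) (n m : Int) (c : Int × Int) : List (Int × Int) :=
  dirs.foldl (fun acc d =>
    if validP n m (c.1 + d.1) (c.2 + d.2) &&
       decide ((pyGet2? grid c.1 c.2).getD 0 ≤ (pyGet2? grid (c.1 + d.1) (c.2 + d.2)).getD 0)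
    then acc ++ [(c.1 + d.1, c.2 + d.2)] else acc) []

-- 'while dq: i, j = dq.pop(); …'  (pop from the right end)
def loopA (grid : List (List Int)) (n m : Int) (visited : List (List Int))
    (dq : List (Int × Int)) : List (List Int) :=
  if hdq : dq = [] then visited
  else
    let c := dq.getLast hdq
    match hv : pyGet2? visited c.1 c.2 with
    | none => visited            -- IndexError in Python (outside Pre_)
    | some t =>
      if ht : t ≠ 0 then loopA grid n m visited dq.dropLast
      else loopA grid n m (pySet2 visited c.1 c.2 1) (dq.dropLast ++ pushNbrs grid n m c)
termination_by (cz visited, dq.length)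
decreasing_by
  · exact Prod.Lex.right _ (by cases dq with | nil => exact absurd rfl hdq | cons a l => simp)
  · rw [not_not] at ht
    subst ht
    exact Prod.Lex.left _ _ (cz_mark_lt _ _ _ hv)

def BFS (grid : List (List Int)) (pos : List (Int × Int)) : List (List Int) :=
  let n : Int := grid.length
  let m : Int := ((PySem.List.pyGet? grid 0).getD []).length   -- len(grid[0]); IndexError on [] (outside Pre_)
  let visited := (PySem.List.pyRange 0 n 1).map (fun _ => (PySem.List.pyRange 0 m 1).map (fun _ => (0 : Int)))
  -- A's 'v = [[0] * m] * n' is never used; not ported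
  loopA grid n m visited pos

-- ===== PORT B =====

-- v[p0][p1] with a default (Python wraparound; the default only shows where Python raises,
-- which Pre_ excludes)
def vget (v : List (List Int)) (p : Int × Int) (d : Int) : Int :=
  (PySem.List.pyGet? ((PySem.List.pyGet? v p.1).getD []) p.2).getD d

-- 'visited[x][y] = 1'
def vmark (v : List (List Int)) (p : Int × Int) : List (List Int) :=
  PySem.List.pySetD v p.1 (PySem.List.pySetD ((PySem.List.pyGet? v p.1).getD []) p.2 1)

-- '((i, j + 1), (i, j - 1), (i + 1, j), (i - 1, j))'
def candsB (i j : Int) : List (Int × Int) := [(i, j + 1), (i, j - 1), (i + 1, j), (i - 1, j)]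

-- '0 <= x < n and 0 <= y < m'
def okB (n m : Int) (p : Int × Int) : Bool := decide (0 ≤ p.1 ∧ p.1 < n ∧ 0 ≤ p.2 ∧ p.2 < m)

-- one frontier cell: 'h = grid[i][j]; for x, y in cands: if ok and grid[x][y] >= h and not
-- visited[x][y]: mark it and put it on the next level'  (the visited read defaults to 1: an
-- out-of-range read, on which Python raises, is outside Pre_)
def scanB (grid : List (List Int)) (n m : Int)
    (st : List (List Int) × List (Int × Int)) (c : Int × Int) :
    List (List Int) × List (Int × Int) :=
  let h := vget grid c 0
  (candsB c.1 c.2).foldl (fun st p =>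
    if okB n m p && decide (h ≤ vget grid p 0) && (vget st.1 p 1 == 0)
    then (vmark st.1 p, st.2 ++ [p]) else st) st

theorem foldl_mu_le {α β : Type} (f : α → β → α) (mu : α → Nat)
    (h : ∀ s x, mu (f s x) ≤ mu s) : ∀ (l : List β) (s : α), mu (l.foldl f s) ≤ mu s := by
  intro l
  induction l with
  | nil => intro s; simp
  | cons a l ih => intro s; exact le_trans (ih (f s a)) (h s a)

theorem getD1_eq_zero (o : Option Int) (h : (o.getD 1 == 0) = true) : o = some 0 := by
  cases o <;> simp_all

theorem vget_eq (v : List (List Int)) (p : Int × Int) (d : Int) :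
    vget v p d = (pyGet2? v p.1 p.2).getD d := by
  unfold vget pyGet2?
  cases h : PySem.List.pyGet? v p.1 with
  | none => simp [PySem.List.pyGet?, PySem.List.pyIdx?]
  | some row => rfl

theorem vmark_eq (v : List (List Int)) (p : Int × Int) :
    vmark v p = pySet2 v p.1 p.2 1 := by
  unfold vmark pySet2 PySem.List.pyGetD
  rfl

theorem scanB_mu (grid : List (List Int)) (n m : Int) (cs : List (Int × Int))
    (s : List (List Int) × List (Int × Int)) :
    cz (cs.foldl (scanB grid n m) s).1 + (cs.foldl (scanB grid n m) s).2.length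
      ≤ cz s.1 + s.2.length := by
  refine foldl_mu_le _ (fun s => cz s.1 + s.2.length) (fun s c => ?_) cs s
  unfold scanB
  refine foldl_mu_le _ (fun s => cz s.1 + s.2.length) (fun s p => ?_) (candsB c.1 c.2) s
  by_cases hg : (okB n m p && decide (vget grid c 0 ≤ vget grid p 0) && (vget s.1 p 1 == 0)) = true
  · have hz : pyGet2? s.1 p.1 p.2 = some 0 := by
      refine getD1_eq_zero _ ?_
      rw [← vget_eq]
      simp only [Bool.and_eq_true] at hg
      exact hg.2
    have hlt : cz (vmark s.1 p) < cz s.1 := by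
      rw [vmark_eq]
      exact cz_mark_lt _ _ _ hz
    simp only [hg, if_true]
    simp
    omega
  · simp only [hg, if_false]
    simp [Bool.not_eq_true] at hg
    simp [hg]

-- 'while cur: nxt = []; for i, j in cur: …; cur = nxt'
def floodB (grid : List (List Int)) (n m : Int) (v : List (List Int))
    (cur : List (Int × Int)) : List (List Int) :=
  if cur = [] then v
  else
    let st := cur.foldl (scanB grid n m) (v, [])
    floodB grid n m st.1 st.2
termination_by cz v + cur.length
decreasing_by
  have h := scanB_mu grid n m cur (v, [])
  have hlen : 0 < cur.length := List.length_pos_of_ne_nil (by assumption)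
  simp only [List.foldl_attach, List.length_nil] at *
  omega

-- 'for k in range(len(pos) - 1, -1, -1): si, sj = pos[k]; …'
def BFS_alt (grid : List (List Int)) (pos : List (Int × Int)) : List (List Int) :=
  let n : Int := grid.length
  let m : Int := ((PySem.List.pyGet? grid 0).getD []).length   -- len(grid[0]); IndexError on [] (outside Pre_)
  (PySem.List.pyRange ((pos.length : Int) - 1) (-1) (-1)).foldl
    (fun v k =>
      let s := PySem.List.pyGetD pos k (0, 0)
      if vget v s 1 ≠ 0 then v
      else floodB grid n m (vmark v s) [s])
    ((PySem.List.pyRange 0 n 1).map (fun _ => PySem.List.pyRepeat [(0 : Int)] m))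

-- ===== PRECONDITION & SPEC =====

-- Pre_ excludes exactly: the empty grid (A raises IndexError on grid[0]); grids with a row shorter
-- than row 0 when there are start positions (the fill raises IndexError when it reaches a missing
-- cell; on the rare such grids whose missing cells the fill never touches, A and B return the same
-- value); and start positions outside Python's index range [-n,n)×[-m,m), where A raises
-- IndexError. Negative in-range start positions (Python wraparound) are INSIDE Pre_ and proved
-- equal.
def Pre_BFS (grid : List (List Int)) (pos : List (Int × Int)) : Prop :=
  grid ≠ [] ∧
  (pos = [] ∨ ∀ row ∈ grid, (grid.headD []).length ≤ row.length) ∧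
  (∀ c ∈ pos, -(grid.length : Int) ≤ c.1 ∧ c.1 < (grid.length : Int) ∧
    -((grid.headD []).length : Int) ≤ c.2 ∧ c.2 < ((grid.headD []).length : Int))

instance (grid : List (List Int)) (pos : List (Int × Int)) : Decidable (Pre_BFS grid pos) := by
  unfold Pre_BFS; infer_instance

def pvWitness_BFS : List (List Int) × (List (Int × Int)) := ([[1, 2], [4, 3]], [(0, 0)])

def Spec_BFS (grid : List (List Int)) (pos : List (Int × Int)) (out : List (List Int)) : Prop :=
  out = BFS_alt grid pos

instance (grid : List (List Int)) (pos : List (Int × Int)) (out : List (List Int)) :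
    Decidable (Spec_BFS grid pos out) := by unfold Spec_BFS; infer_instance

-- ===== CLAIM (what is proved, stated in full; the proofs are below) =====
def Claim_equal_BFS : Prop := ∀ (grid : List (List Int)) (pos : List (Int × Int)),
  Dom_BFS grid pos → Pre_BFS grid pos → Spec_BFS grid pos (BFS grid pos)

-- ===== LEMMAS AND PROOFS =====

-- the in-bounds cells, as a finite set
noncomputable def box (n m : Int) : Finset (Int × Int) := Finset.Ico 0 n ×ˢ Finset.Ico 0 m

theorem mem_box {n m : Int} {c : Int × Int} : c ∈ box n m ↔ validP n m c.1 c.2 = true := by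
  simp [box, validP, Finset.mem_product, Finset.mem_Ico, and_assoc]

-- the visited matrix determined by a set of marked cells
def render (n m : Int) (S : Finset (Int × Int)) : List (List Int) :=
  (List.range n.toNat).map (fun i : Nat =>
    (List.range m.toNat).map (fun j : Nat => if ((i : Int), (j : Int)) ∈ S then 1 else 0))

-- reachability from s avoiding S (all nodes on the path, including both ends, outside S)
inductive RA (grid : List (List Int)) (n m : Int) (S : Finset (Int × Int)) :
    (Int × Int) → (Int × Int) → Prop where
  | base (c : Int × Int) (hbox : c ∈ box n m) (hns : c ∉ S) : RA grid n m S c c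
  | step (s b c : Int × Int) (hb : RA grid n m S s b) (hc : c ∈ pushNbrs grid n m b)
      (hns : c ∉ S) : RA grid n m S s c

-- abstract version of A's worklist loop (front of the list = top of A's stack)
noncomputable def execA (grid : List (List Int)) (n m : Int) (S : Finset (Int × Int))
    (T : List (Int × Int)) : Finset (Int × Int) :=
  match T with
  | [] => S
  | c :: T' =>
    if c ∈ S ∨ c ∉ box n m then execA grid n m S T'
    else execA grid n m (insert c S) ((pushNbrs grid n m c).reverse ++ T')
termination_by ((box n m \ S).card, T.length)
decreasing_by
  · exact Prod.Lex.right _ (Nat.lt_succ_self _)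
  · refine Prod.Lex.left _ _ ?_
    rename_i h
    rw [not_or, not_not] at h
    rw [Finset.sdiff_insert]
    exact Finset.card_erase_lt_of_mem (Finset.mem_sdiff.mpr ⟨h.2, h.1⟩)

-- abstract version of B's per-cell neighbour scan
def absRound (grid : List (List Int)) (n m : Int)
    (s : Finset (Int × Int) × List (Int × Int)) (c : Int × Int) :
    Finset (Int × Int) × List (Int × Int) :=
  dirs.foldl (fun s d =>
    if (validP n m (c.1 + d.1) (c.2 + d.2) &&
        decide ((pyGet2? grid c.1 c.2).getD 0 ≤ (pyGet2? grid (c.1 + d.1) (c.2 + d.2)).getD 0)) = true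
       ∧ (c.1 + d.1, c.2 + d.2) ∉ s.1
    then (insert (c.1 + d.1, c.2 + d.2) s.1, s.2 ++ [(c.1 + d.1, c.2 + d.2)]) else s) s

theorem absRound_mu (grid : List (List Int)) (n m : Int) (cs : List (Int × Int))
    (s : Finset (Int × Int) × List (Int × Int)) :
    ((box n m \ (cs.foldl (absRound grid n m) s).1).card + (cs.foldl (absRound grid n m) s).2.length)
      ≤ (box n m \ s.1).card + s.2.length := by
  refine foldl_mu_le _ (fun s => (box n m \ s.1).card + s.2.length) (fun s c => ?_) cs s
  unfold absRound
  refine foldl_mu_le _ (fun s => (box n m \ s.1).card + s.2.length) (fun s d => ?_) dirs s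
  by_cases hg : (validP n m (c.1 + d.1) (c.2 + d.2) &&
        decide ((pyGet2? grid c.1 c.2).getD 0 ≤ (pyGet2? grid (c.1 + d.1) (c.2 + d.2)).getD 0)) = true
       ∧ (c.1 + d.1, c.2 + d.2) ∉ s.1
  · have hb : (c.1 + d.1, c.2 + d.2) ∈ box n m \ s.1 := by
      rw [Finset.mem_sdiff]
      refine ⟨mem_box.mpr ?_, hg.2⟩
      have := hg.1
      simp only [Bool.and_eq_true] at this
      exact this.1
    have hcard : (box n m \ insert (c.1 + d.1, c.2 + d.2) s.1).card = (box n m \ s.1).card - 1 := by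
      rw [Finset.sdiff_insert, Finset.card_erase_of_mem hb]
    have hpos : 0 < (box n m \ s.1).card := Finset.card_pos.mpr ⟨_, hb⟩
    simp only [hg, if_true]
    simp
    omega
  · simp only [hg, if_false]
    simp [hg]

-- abstract version of B's frontier loop
def absLoop (grid : List (List Int)) (n m : Int) (S : Finset (Int × Int))
    (cur : List (Int × Int)) : Finset (Int × Int) :=
  if cur = [] then S
  else
    let s := cur.foldl (absRound grid n m) (S, [])
    absLoop grid n m s.1 s.2
termination_by (box n m \ S).card + cur.length
decreasing_by
  have h := absRound_mu grid n m cur (S, [])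
  have hlen : 0 < cur.length := List.length_pos_of_ne_nil (by assumption)
  simp only [List.foldl_attach, List.length_nil] at *
  omega

-- B's per-cell scan, stated over pyGet2? / pySet2 (the shape the simulation lemmas use)
def roundB (grid : List (List Int)) (n m : Int)
    (s : List (List Int) × List (Int × Int)) (c : Int × Int) : List (List Int) × List (Int × Int) :=
  dirs.foldl (fun s d =>
    if validP n m (c.1 + d.1) (c.2 + d.2) &&
       decide ((pyGet2? grid c.1 c.2).getD 0 ≤ (pyGet2? grid (c.1 + d.1) (c.2 + d.2)).getD 0) &&
       ((pyGet2? s.1 (c.1 + d.1) (c.2 + d.2)).getD 1 == 0)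
    then (pySet2 s.1 (c.1 + d.1) (c.2 + d.2) 1, s.2 ++ [(c.1 + d.1, c.2 + d.2)]) else s) s

theorem roundB_mu (grid : List (List Int)) (n m : Int) (cs : List (Int × Int))
    (s : List (List Int) × List (Int × Int)) :
    cz (cs.foldl (roundB grid n m) s).1 + (cs.foldl (roundB grid n m) s).2.length
      ≤ cz s.1 + s.2.length := by
  refine foldl_mu_le _ (fun s => cz s.1 + s.2.length) (fun s c => ?_) cs s
  unfold roundB
  refine foldl_mu_le _ (fun s => cz s.1 + s.2.length) (fun s d => ?_) dirs s
  by_cases hg : (validP n m (c.1 + d.1) (c.2 + d.2) &&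
       decide ((pyGet2? grid c.1 c.2).getD 0 ≤ (pyGet2? grid (c.1 + d.1) (c.2 + d.2)).getD 0) &&
       ((pyGet2? s.1 (c.1 + d.1) (c.2 + d.2)).getD 1 == 0)) = true
  · have hz : pyGet2? s.1 (c.1 + d.1) (c.2 + d.2) = some 0 := by
      refine getD1_eq_zero _ ?_
      simp only [Bool.and_eq_true] at hg
      exact hg.2
    have := cz_mark_lt s.1 (c.1 + d.1) (c.2 + d.2) hz
    simp only [hg, if_true]
    simp
    omega
  · simp only [hg, if_false]
    simp [Bool.not_eq_true] at hg
    simp [hg]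

-- B's frontier loop in the pyGet2?/pySet2 shape
def loopB (grid : List (List Int)) (n m : Int) (visited : List (List Int))
    (cur : List (Int × Int)) : List (List Int) :=
  if cur = [] then visited
  else
    let s := cur.foldl (roundB grid n m) (visited, [])
    loopB grid n m s.1 s.2
termination_by cz visited + cur.length
decreasing_by
  have h := roundB_mu grid n m cur (visited, [])
  have hlen : 0 < cur.length := List.length_pos_of_ne_nil (by assumption)
  simp only [List.foldl_attach, List.length_nil] at *
  omega

-- the port's candidate list is A's delta list applied to the cell
theorem candsB_eq (i j : Int) :
    candsB i j = dirs.map (fun d => (i + d.1, j + d.2)) := by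
  simp [candsB, dirs]
  omega

theorem okB_eq (n m : Int) (p : Int × Int) : okB n m p = validP n m p.1 p.2 := by
  unfold okB validP
  by_cases h1 : (0 : Int) ≤ p.1 <;> by_cases h2 : p.1 < n <;>
    by_cases h3 : (0 : Int) ≤ p.2 <;> by_cases h4 : p.2 < m <;>
    simp [h1, h2, h3, h4]

-- the port's scan is roundB
theorem scanB_eq_roundB (grid : List (List Int)) (n m : Int)
    (st : List (List Int) × List (Int × Int)) (c : Int × Int) :
    scanB grid n m st c = roundB grid n m st c := by
  unfold scanB roundB
  rw [candsB_eq, List.foldl_map]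
  congr 1
  funext s d
  simp only [okB_eq, vget_eq, vmark_eq]

theorem floodB_eq_loopB (grid : List (List Int)) (n m : Int) :
    ∀ (K : Nat) (v : List (List Int)) (cur : List (Int × Int)),
      cz v + cur.length ≤ K → floodB grid n m v cur = loopB grid n m v cur := by
  intro K
  induction K with
  | zero =>
    intro v cur h
    have : cur = [] := by cases cur with | nil => rfl | cons a l => simp at h
    subst this
    rw [floodB.eq_def, loopB.eq_def]
    simp
  | succ K ihK =>
    intro v cur h
    by_cases hc : cur = []
    · subst hc
      rw [floodB.eq_def, loopB.eq_def]
      simp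
    · rw [floodB.eq_def, loopB.eq_def, if_neg hc, if_neg hc]
      simp only []
      have hfold : cur.foldl (scanB grid n m) (v, []) = cur.foldl (roundB grid n m) (v, []) := by
        apply PySem.List.foldl_congr_mem
        intro acc x _
        exact scanB_eq_roundB grid n m acc x
      rw [hfold]
      apply ihK
      have hmu := roundB_mu grid n m cur (v, [])
      have hlen : 0 < cur.length := List.length_pos_of_ne_nil hc
      simp only [List.length_nil] at hmu
      omega

-- characterisation of A's push list
theorem pushNbrs_eq (grid : List (List Int)) (n m : Int) (c : Int × Int) :
    pushNbrs grid n m c =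
      (dirs.filter (fun d => validP n m (c.1 + d.1) (c.2 + d.2) &&
        decide ((pyGet2? grid c.1 c.2).getD 0 ≤ (pyGet2? grid (c.1 + d.1) (c.2 + d.2)).getD 0))).map
        (fun d => (c.1 + d.1, c.2 + d.2)) := by
  unfold pushNbrs
  rw [PySem.List.foldl_append_if]
  simp

theorem mem_pushNbrs {grid : List (List Int)} {n m : Int} {c z : Int × Int} :
    z ∈ pushNbrs grid n m c ↔ ∃ d ∈ dirs, (validP n m (c.1 + d.1) (c.2 + d.2) &&
      decide ((pyGet2? grid c.1 c.2).getD 0 ≤ (pyGet2? grid (c.1 + d.1) (c.2 + d.2)).getD 0)) = true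
      ∧ z = (c.1 + d.1, c.2 + d.2) := by
  rw [pushNbrs_eq]
  simp [List.mem_filter]
  tauto

theorem pushNbrs_box {grid : List (List Int)} {n m : Int} {c z : Int × Int}
    (h : z ∈ pushNbrs grid n m c) : z ∈ box n m := by
  obtain ⟨d, _, hg, hz⟩ := mem_pushNbrs.mp h
  rw [mem_box, hz]
  simp only [Bool.and_eq_true] at hg
  exact hg.1

-- A's initial all-zero matrix is the rendering of the empty set
theorem render_empty (n m : Int) :
    (PySem.List.pyRange 0 n 1).map (fun _ => (PySem.List.pyRange 0 m 1).map (fun _ => (0 : Int)))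
      = render n m (∅ : Finset (Int × Int)) := by
  simp [render, PySem.List.pyRange_one, Function.comp_def]

-- B's initial all-zero matrix ('[[0] * m for _ in range(n)]') is the same rendering
theorem render_empty_B (n m : Int) :
    (PySem.List.pyRange 0 n 1).map (fun _ => PySem.List.pyRepeat [(0 : Int)] m)
      = render n m (∅ : Finset (Int × Int)) := by
  simp [render, PySem.List.pyRange_one, Function.comp_def,
    PySem.List.pyRepeat_singleton, List.map_const']

theorem pyGet2?_row (g : List (List Int)) (i j : Int) (row : List Int)
    (h : PySem.List.pyGet? g i = some row) : pyGet2? g i j = PySem.List.pyGet? row j := by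
  unfold pyGet2?
  rw [h]

theorem render_row (n m : Int) (S : Finset (Int × Int)) (i : Int)
    (hi : 0 ≤ i) (hi2 : i < n) :
    PySem.List.pyGet? (render n m S) i
      = some ((List.range m.toNat).map (fun jj : Nat => if (i, (jj : Int)) ∈ S then 1 else 0)) := by
  have hiN : i.toNat < n.toNat := by omega
  rw [PySem.List.pyGet?_of_nonneg _ hi]
  unfold render
  rw [List.getElem?_map, List.getElem?_range hiN]
  simp [Int.toNat_of_nonneg hi]

theorem render_get (n m : Int) (S : Finset (Int × Int)) (i j : Int)
    (hi : 0 ≤ i) (hi2 : i < n) (hj : 0 ≤ j) (hj2 : j < m) :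
    pyGet2? (render n m S) i j = some (if (i, j) ∈ S then 1 else 0) := by
  have hjN : j.toNat < m.toNat := by omega
  rw [pyGet2?_row _ _ _ _ (render_row n m S i hi hi2)]
  rw [PySem.List.pyGet?_of_nonneg _ hj]
  rw [List.getElem?_map, List.getElem?_range hjN]
  simp [Int.toNat_of_nonneg hj]

theorem render_set (n m : Int) (S : Finset (Int × Int)) (i j : Int)
    (hi : 0 ≤ i) (hi2 : i < n) (hj : 0 ≤ j) (hj2 : j < m) :
    pySet2 (render n m S) i j 1 = render n m (insert (i, j) S) := by
  have hiN : i.toNat < n.toNat := by omega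
  have hjN : j.toNat < m.toNat := by omega
  have hrow : PySem.List.pyGetD (render n m S) i []
      = (List.range m.toNat).map (fun jj : Nat => if (i, (jj : Int)) ∈ S then 1 else 0) := by
    simp [PySem.List.pyGetD, PySem.List.pyGet?_of_nonneg, render_row n m S i hi hi2]
  unfold pySet2
  rw [hrow, PySem.List.pySetD_of_nonneg _ _ hj, PySem.List.pySetD_of_nonneg _ _ hi]
  apply List.ext_getElem
  · simp [render]
  · intro k hk1 hk2
    simp only [render, List.length_set, List.length_map, List.length_range] at hk1 hk2
    rw [List.getElem_set]
    simp only [render, List.getElem_map, List.getElem_range]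
    by_cases hki : i.toNat = k
    · rw [if_pos hki]
      apply List.ext_getElem
      · simp
      · intro l hl1 hl2
        simp only [List.length_set, List.length_map, List.length_range] at hl1 hl2
        rw [List.getElem_set]
        simp only [List.getElem_map, List.getElem_range]
        by_cases hlj : j.toNat = l
        · rw [if_pos hlj]
          rw [if_pos]
          rw [Finset.mem_insert]
          left
          have : ((k : Int), (l : Int)) = (i, j) := by
            rw [Prod.ext_iff]
            constructor <;> simp <;> omega
          exact this
        · rw [if_neg hlj]
          have : ((i : Int), (l : Int)) ∈ insert (i, j) S ↔ ((i : Int), (l : Int)) ∈ S := by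
            rw [Finset.mem_insert]
            constructor
            · rintro (h | h)
              · exfalso
                have h2 := congrArg Prod.snd h
                simp at h2
                omega
              · exact h
            · exact Or.inr
          have hik : (i : Int) = (k : Int) := by omega
          rw [← hik]
          simp [this]
    · rw [if_neg hki]
      apply List.ext_getElem
      · simp
      · intro l hl1 hl2
        simp only [List.length_map, List.length_range] at hl1 hl2
        simp only [List.getElem_map, List.getElem_range]
        have : ((k : Int), (l : Int)) ∈ insert (i, j) S ↔ ((k : Int), (l : Int)) ∈ S := by
          rw [Finset.mem_insert]
          constructor
          · rintro (h | h)
            · exfalso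
              have h2 := congrArg Prod.fst h
              simp at h2
              omega
            · exact h
          · exact Or.inr
        simp [this]

theorem RA_start {grid : List (List Int)} {n m : Int} {S : Finset (Int × Int)} {s x : Int × Int}
    (h : RA grid n m S s x) : s ∈ box n m ∧ s ∉ S := by
  induction h with
  | base hbox hns => exact ⟨hbox, hns⟩
  | step b2 c2 hb hc2 hns ih => exact ih

theorem RA_mono {grid : List (List Int)} {n m : Int} {S : Finset (Int × Int)} {c s x : Int × Int}
    (h : RA grid n m (insert c S) s x) : RA grid n m S s x := by
  induction h with
  | base hbox hns => exact RA.base _ hbox (fun hx => hns (Finset.mem_insert_of_mem hx))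
  | step b2 c2 hb hc2 hns ih =>
      exact RA.step _ _ _ ih hc2 (fun hx => hns (Finset.mem_insert_of_mem hx))

theorem RA_prepend {grid : List (List Int)} {n m : Int} {S : Finset (Int × Int)} {c s x : Int × Int}
    (hc : c ∈ box n m) (hcs : c ∉ S) (hs : s ∈ pushNbrs grid n m c)
    (h : RA grid n m S s x) : RA grid n m S c x := by
  induction h with
  | base hbox hns => exact RA.step _ _ _ (RA.base c hc hcs) hs hns
  | step b2 c2 hb hc2 hns ih => exact RA.step _ _ _ ih hc2 hns

theorem RA_fwd {grid : List (List Int)} {n m : Int} {S : Finset (Int × Int)} {c : Int × Int}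
    (hc : c ∈ box n m) (hcs : c ∉ S) {s x : Int × Int} (h : RA grid n m S s x) :
    x = c ∨ (∃ s' ∈ pushNbrs grid n m c, RA grid n m (insert c S) s' x)
      ∨ RA grid n m (insert c S) s x := by
  induction h with
  | base hbox hns =>
    by_cases hxc : s = c
    · exact Or.inl hxc
    · exact Or.inr (Or.inr (RA.base s hbox (by simp [Finset.mem_insert, hxc, hns])))
  | step b x2 hb hx2 hns ih =>
    by_cases hxc : x2 = c
    · exact Or.inl hxc
    · have hx2' : x2 ∉ insert c S := by simp [Finset.mem_insert, hxc, hns]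
      rcases ih with hbc | ⟨s', hs', hras'⟩ | hras
      · subst hbc
        exact Or.inr (Or.inl ⟨x2, hx2, RA.base x2 (pushNbrs_box hx2) hx2'⟩)
      · exact Or.inr (Or.inl ⟨s', hs', RA.step _ _ _ hras' hx2 hx2'⟩)
      · exact Or.inr (Or.inr (RA.step _ _ _ hras hx2 hx2'))

theorem skip_iff {grid : List (List Int)} {n m : Int} {S : Finset (Int × Int)} {c x : Int × Int}
    (hc : c ∈ S ∨ c ∉ box n m) (T' : List (Int × Int)) :
    (x ∈ S ∨ ∃ s ∈ c :: T', RA grid n m S s x) ↔ (x ∈ S ∨ ∃ s ∈ T', RA grid n m S s x) := by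
  constructor
  · rintro (hx | ⟨s, hs, hra⟩)
    · exact Or.inl hx
    · rcases List.mem_cons.mp hs with rfl | hs'
      · rcases RA_start hra with ⟨hbox, hns⟩
        rcases hc with hc | hc
        · exact absurd hc hns
        · exact absurd hbox hc
      · exact Or.inr ⟨s, hs', hra⟩
  · rintro (hx | ⟨s, hs, hra⟩)
    · exact Or.inl hx
    · exact Or.inr ⟨s, List.mem_cons_of_mem _ hs, hra⟩

theorem exchange_iff {grid : List (List Int)} {n m : Int} {S : Finset (Int × Int)} {c x : Int × Int}
    (hcb : c ∈ box n m) (hcs : c ∉ S) (T' : List (Int × Int)) :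
    (x ∈ insert c S ∨ ∃ s ∈ (pushNbrs grid n m c).reverse ++ T', RA grid n m (insert c S) s x)
      ↔ (x ∈ S ∨ ∃ s ∈ c :: T', RA grid n m S s x) := by
  constructor
  · rintro (hx | ⟨s, hs, hra⟩)
    · rcases Finset.mem_insert.mp hx with rfl | hx
      · exact Or.inr ⟨x, List.mem_cons_self, RA.base x hcb hcs⟩
      · exact Or.inl hx
    · rcases List.mem_append.mp hs with hs | hs
      · have hs' : s ∈ pushNbrs grid n m c := List.mem_reverse.mp hs
        exact Or.inr ⟨c, List.mem_cons_self, RA_prepend hcb hcs hs' (RA_mono hra)⟩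
      · exact Or.inr ⟨s, List.mem_cons_of_mem _ hs, RA_mono hra⟩
  · rintro (hx | ⟨s, hs, hra⟩)
    · exact Or.inl (Finset.mem_insert_of_mem hx)
    · rcases RA_fwd hcb hcs hra with rfl | ⟨s', hs', hras'⟩ | hras
      · exact Or.inl (Finset.mem_insert_self _ _)
      · exact Or.inr ⟨s', List.mem_append.mpr (Or.inl (List.mem_reverse.mpr hs')), hras'⟩
      · rcases List.mem_cons.mp hs with rfl | hs'
        · rcases RA_start hras with ⟨_, hns⟩
          exact absurd (Finset.mem_insert_self _ _) hns
        · exact Or.inr ⟨s, List.mem_append.mpr (Or.inr hs'), hras⟩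

theorem card_after_insert {n m : Int} {S : Finset (Int × Int)} {c : Int × Int} {K : Nat}
    (hcb : c ∈ box n m) (hcs : c ∉ S) (h : (box n m \ S).card ≤ K + 1) :
    (box n m \ insert c S).card ≤ K := by
  have hb : c ∈ box n m \ S := Finset.mem_sdiff.mpr ⟨hcb, hcs⟩
  rw [Finset.sdiff_insert, Finset.card_erase_of_mem hb]
  have := Finset.card_pos.mpr ⟨_, hb⟩
  omega

theorem charA (grid : List (List Int)) (n m : Int) :
    ∀ (K : Nat) (S : Finset (Int × Int)), (box n m \ S).card ≤ K →
    ∀ (T : List (Int × Int)) (x : Int × Int),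
      (x ∈ execA grid n m S T ↔ x ∈ S ∨ ∃ s ∈ T, RA grid n m S s x) := by
  intro K
  induction K with
  | zero =>
    intro S hS T x
    induction T with
    | nil => simp [execA]
    | cons c T' ihT =>
      have hc : c ∈ S ∨ c ∉ box n m := by
        by_contra hcon
        rw [not_or, not_not] at hcon
        have hb : c ∈ box n m \ S := Finset.mem_sdiff.mpr ⟨hcon.2, hcon.1⟩
        have := Finset.card_pos.mpr ⟨_, hb⟩
        omega
      rw [execA, if_pos hc, ihT, skip_iff hc]
  | succ K ihK =>
    intro S hS T x
    induction T with
    | nil => simp [execA]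
    | cons c T' ihT =>
      by_cases hc : c ∈ S ∨ c ∉ box n m
      · rw [execA, if_pos hc, ihT, skip_iff hc]
      · rw [not_or, not_not] at hc
        rw [execA, if_neg (by rw [not_or, not_not]; exact hc)]
        rw [ihK _ (card_after_insert hc.2 hc.1 hS)]
        exact exchange_iff hc.2 hc.1 T'

theorem mem_box_bounds {n m : Int} {c : Int × Int} (h : c ∈ box n m) :
    0 ≤ c.1 ∧ c.1 < n ∧ 0 ≤ c.2 ∧ c.2 < m := by
  rw [mem_box, validP] at h
  simp at h
  tauto

theorem simA_step (grid : List (List Int)) (n m : Int) (S : Finset (Int × Int))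
    (rest : List (Int × Int)) (c : Int × Int) (hcb : c ∈ box n m) :
    loopA grid n m (render n m S) (rest ++ [c]) =
      if c ∈ S then loopA grid n m (render n m S) rest
      else loopA grid n m (render n m (insert c S)) (rest ++ pushNbrs grid n m c) := by
  obtain ⟨h1, h2, h3, h4⟩ := mem_box_bounds hcb
  rw [loopA.eq_def]
  rw [dif_neg (by simp : ¬(rest ++ [c] = []))]
  simp only [List.getLast_concat, List.dropLast_concat]
  split
  · rename_i hv
    rw [List.getLast_concat] at hv
    rw [render_get n m S c.1 c.2 h1 h2 h3 h4] at hv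
    simp at hv
  · rename_i t hv
    rw [List.getLast_concat] at hv
    rw [render_get n m S c.1 c.2 h1 h2 h3 h4] at hv
    rw [Option.some_inj] at hv
    by_cases hmem : c ∈ S
    · have hcc : (c.1, c.2) ∈ S := by simpa using hmem
      rw [if_pos hcc] at hv
      rw [if_pos hmem, dif_pos (by omega : t ≠ 0)]
    · have hcc : (c.1, c.2) ∉ S := by simpa using hmem
      rw [if_neg hcc] at hv
      rw [if_neg hmem, dif_neg (by omega : ¬ t ≠ 0)]
      rw [render_set n m S c.1 c.2 h1 h2 h3 h4]

theorem simRound (grid : List (List Int)) (n m : Int) (c : Int × Int)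
    (S : Finset (Int × Int)) (L : List (Int × Int)) :
    roundB grid n m (render n m S, L) c
      = (render n m (absRound grid n m (S, L) c).1, (absRound grid n m (S, L) c).2) := by
  unfold roundB absRound
  generalize dirs = ds
  induction ds generalizing S L with
  | nil => simp
  | cons d ds ih =>
    simp only [List.foldl_cons]
    by_cases hval : (validP n m (c.1 + d.1) (c.2 + d.2) &&
        decide ((pyGet2? grid c.1 c.2).getD 0 ≤ (pyGet2? grid (c.1 + d.1) (c.2 + d.2)).getD 0)) = true
    · have hb : (c.1 + d.1, c.2 + d.2) ∈ box n m := by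
        rw [mem_box]
        have h := hval
        rw [Bool.and_eq_true] at h
        exact h.1
      obtain ⟨h1, h2, h3, h4⟩ := mem_box_bounds hb
      by_cases hz : (c.1 + d.1, c.2 + d.2) ∈ S
      · have hrd : pyGet2? (render n m S) (c.1 + d.1) (c.2 + d.2) = some 1 := by
          rw [render_get n m S _ _ h1 h2 h3 h4, if_pos hz]
        have hg : (validP n m (c.1 + d.1) (c.2 + d.2) &&
            decide ((pyGet2? grid c.1 c.2).getD 0 ≤ (pyGet2? grid (c.1 + d.1) (c.2 + d.2)).getD 0) &&
            ((pyGet2? (render n m S) (c.1 + d.1) (c.2 + d.2)).getD 1 == 0)) = false := by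
          rw [hrd]
          simp
        rw [hg]
        simp only [Bool.false_eq_true, if_false]
        rw [if_neg (fun hand => hand.2 hz)]
        exact ih S L
      · have hrd : pyGet2? (render n m S) (c.1 + d.1) (c.2 + d.2) = some 0 := by
          rw [render_get n m S _ _ h1 h2 h3 h4, if_neg hz]
        have hg : (validP n m (c.1 + d.1) (c.2 + d.2) &&
            decide ((pyGet2? grid c.1 c.2).getD 0 ≤ (pyGet2? grid (c.1 + d.1) (c.2 + d.2)).getD 0) &&
            ((pyGet2? (render n m S) (c.1 + d.1) (c.2 + d.2)).getD 1 == 0)) = true := by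
          rw [hrd]
          simp [hval]
        rw [hg]
        simp only [if_true]
        rw [if_pos (And.intro hval hz)]
        rw [render_set n m S _ _ h1 h2 h3 h4]
        exact ih (insert (c.1 + d.1, c.2 + d.2) S) (L ++ [(c.1 + d.1, c.2 + d.2)])
    · have hval' : (validP n m (c.1 + d.1) (c.2 + d.2) &&
        decide ((pyGet2? grid c.1 c.2).getD 0 ≤ (pyGet2? grid (c.1 + d.1) (c.2 + d.2)).getD 0)) = false := by
        simpa using hval
      have hg : (validP n m (c.1 + d.1) (c.2 + d.2) &&
          decide ((pyGet2? grid c.1 c.2).getD 0 ≤ (pyGet2? grid (c.1 + d.1) (c.2 + d.2)).getD 0) &&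
          ((pyGet2? (render n m S, L).1 (c.1 + d.1) (c.2 + d.2)).getD 1 == 0)) = false := by
        rw [hval']
        simp
      rw [hg]
      simp only [Bool.false_eq_true, if_false]
      rw [if_neg (fun hand => hval (hand.1))]
      exact ih S L

theorem simRoundFold (grid : List (List Int)) (n m : Int) :
    ∀ (cur : List (Int × Int)) (S : Finset (Int × Int)) (L : List (Int × Int)),
    cur.foldl (roundB grid n m) (render n m S, L)
      = (render n m ((cur.foldl (absRound grid n m) (S, L)).1),
         (cur.foldl (absRound grid n m) (S, L)).2) := by
  intro cur
  induction cur with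
  | nil => intro S L; simp
  | cons c cur ih =>
    intro S L
    simp only [List.foldl_cons]
    rw [simRound]
    exact ih _ _

theorem simLoopB (grid : List (List Int)) (n m : Int) :
    ∀ (K : Nat) (S : Finset (Int × Int)) (cur : List (Int × Int)),
      (box n m \ S).card + cur.length ≤ K →
      loopB grid n m (render n m S) cur = render n m (absLoop grid n m S cur) := by
  intro K
  induction K with
  | zero =>
    intro S cur h
    have : cur = [] := by
      cases cur with
      | nil => rfl
      | cons a l => simp at h
    subst this
    rw [loopB.eq_def, absLoop.eq_def]
    simp
  | succ K ihK =>
    intro S cur h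
    by_cases hcur : cur = []
    · subst hcur
      rw [loopB.eq_def, absLoop.eq_def]
      simp
    · rw [loopB.eq_def, absLoop.eq_def, if_neg hcur, if_neg hcur]
      simp only []
      rw [simRoundFold]
      dsimp only
      apply ihK
      have hmu := absRound_mu grid n m cur (S, [])
      have hlen : 0 < cur.length := List.length_pos_of_ne_nil hcur
      simp only [List.length_nil] at hmu
      omega

def absRoundGo (grid : List (List Int)) (n m : Int) (c : Int × Int)
    (ds : List (Int × Int)) (s : Finset (Int × Int) × List (Int × Int)) :
    Finset (Int × Int) × List (Int × Int) :=
  ds.foldl (fun s d =>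
    if (validP n m (c.1 + d.1) (c.2 + d.2) &&
        decide ((pyGet2? grid c.1 c.2).getD 0 ≤ (pyGet2? grid (c.1 + d.1) (c.2 + d.2)).getD 0)) = true
       ∧ (c.1 + d.1, c.2 + d.2) ∉ s.1
    then (insert (c.1 + d.1, c.2 + d.2) s.1, s.2 ++ [(c.1 + d.1, c.2 + d.2)]) else s) s

theorem absRound_eq (grid : List (List Int)) (n m : Int)
    (s : Finset (Int × Int) × List (Int × Int)) (c : Int × Int) :
    absRound grid n m s c = absRoundGo grid n m c dirs s := rfl

theorem absRoundGo_mono (grid : List (List Int)) (n m : Int) (c : Int × Int) :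
    ∀ (ds : List (Int × Int)) (s : Finset (Int × Int) × List (Int × Int)),
      (∀ x, x ∈ s.1 → x ∈ (absRoundGo grid n m c ds s).1) ∧
      (∀ z, z ∈ s.2 → z ∈ (absRoundGo grid n m c ds s).2) := by
  intro ds
  induction ds with
  | nil => intro s; exact ⟨fun x h => h, fun z h => h⟩
  | cons d ds ih =>
    intro s
    unfold absRoundGo
    simp only [List.foldl_cons]
    split
    · refine ⟨fun x h => (ih _).1 x (Finset.mem_insert_of_mem h), fun z h => (ih _).2 z ?_⟩
      simp [h]
    · exact ih s

theorem absRoundGo_new (grid : List (List Int)) (n m : Int) (c : Int × Int) :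
    ∀ (ds : List (Int × Int)), (∀ d ∈ ds, d ∈ dirs) →
    ∀ (s : Finset (Int × Int) × List (Int × Int)),
      ∀ x ∈ (absRoundGo grid n m c ds s).1,
        x ∈ s.1 ∨ (x ∈ pushNbrs grid n m c ∧ x ∈ (absRoundGo grid n m c ds s).2) := by
  intro ds
  induction ds with
  | nil => intro _ s x hx; exact Or.inl hx
  | cons d ds ih =>
    intro hsub s x hx
    have hd : d ∈ dirs := hsub d (by simp)
    have hsub' : ∀ d' ∈ ds, d' ∈ dirs := fun d' hd' => hsub d' (by simp [hd'])
    unfold absRoundGo at hx ⊢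
    simp only [List.foldl_cons] at hx ⊢
    by_cases hg : (validP n m (c.1 + d.1) (c.2 + d.2) &&
        decide ((pyGet2? grid c.1 c.2).getD 0 ≤ (pyGet2? grid (c.1 + d.1) (c.2 + d.2)).getD 0)) = true
       ∧ (c.1 + d.1, c.2 + d.2) ∉ s.1
    · rw [if_pos hg] at hx ⊢
      rcases ih hsub' _ x hx with hx1 | hx2
      · rcases Finset.mem_insert.mp hx1 with rfl | hx1
        · refine Or.inr ⟨mem_pushNbrs.mpr ⟨d, hd, hg.1, rfl⟩, ?_⟩
          exact (absRoundGo_mono grid n m c ds _).2 _ (by simp)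
        · exact Or.inl hx1
      · exact Or.inr hx2
    · rw [if_neg hg] at hx ⊢
      exact ih hsub' s x hx

theorem absRoundGo_frontier (grid : List (List Int)) (n m : Int) (c : Int × Int) :
    ∀ (ds : List (Int × Int)) (s : Finset (Int × Int) × List (Int × Int)),
      ∀ z ∈ (absRoundGo grid n m c ds s).2,
        z ∈ s.2 ∨ z ∈ (absRoundGo grid n m c ds s).1 := by
  intro ds
  induction ds with
  | nil => intro s z hz; exact Or.inl hz
  | cons d ds ih =>
    intro s z hz
    unfold absRoundGo at hz ⊢
    simp only [List.foldl_cons] at hz ⊢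
    by_cases hg : (validP n m (c.1 + d.1) (c.2 + d.2) &&
        decide ((pyGet2? grid c.1 c.2).getD 0 ≤ (pyGet2? grid (c.1 + d.1) (c.2 + d.2)).getD 0)) = true
       ∧ (c.1 + d.1, c.2 + d.2) ∉ s.1
    · rw [if_pos hg] at hz ⊢
      rcases ih _ z hz with hz1 | hz2
      · rcases List.mem_append.mp hz1 with hz1 | hz1
        · exact Or.inl hz1
        · simp only [List.mem_singleton] at hz1
          subst hz1
          exact Or.inr ((absRoundGo_mono grid n m c ds _).1 _ (Finset.mem_insert_self _ _))
      · exact Or.inr hz2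
    · rw [if_neg hg] at hz ⊢
      exact ih s z hz

theorem absRoundGo_covers (grid : List (List Int)) (n m : Int) (c : Int × Int) :
    ∀ (ds : List (Int × Int)) (s : Finset (Int × Int) × List (Int × Int)) (d : Int × Int),
      d ∈ ds →
      (validP n m (c.1 + d.1) (c.2 + d.2) &&
        decide ((pyGet2? grid c.1 c.2).getD 0 ≤ (pyGet2? grid (c.1 + d.1) (c.2 + d.2)).getD 0)) = true →
      (c.1 + d.1, c.2 + d.2) ∈ (absRoundGo grid n m c ds s).1 := by
  intro ds
  induction ds with
  | nil => intro s d hd; simp at hd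
  | cons d0 ds ih =>
    intro s d hd hg
    rcases List.mem_cons.mp hd with rfl | hd'
    · unfold absRoundGo
      simp only [List.foldl_cons]
      by_cases hmem : (c.1 + d.1, c.2 + d.2) ∈ s.1
      · split
        · exact (absRoundGo_mono grid n m c ds _).1 _ (Finset.mem_insert_of_mem hmem)
        · exact (absRoundGo_mono grid n m c ds _).1 _ hmem
      · rw [if_pos ⟨hg, hmem⟩]
        exact (absRoundGo_mono grid n m c ds _).1 _ (Finset.mem_insert_self _ _)
    · unfold absRoundGo
      simp only [List.foldl_cons]
      split
      · exact ih _ d hd' hg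
      · exact ih _ d hd' hg

theorem pushNbrs_covers (grid : List (List Int)) (n m : Int) (c : Int × Int)
    (s : Finset (Int × Int) × List (Int × Int)) :
    ∀ z ∈ pushNbrs grid n m c, z ∈ (absRound grid n m s c).1 := by
  intro z hz
  obtain ⟨d, hd, hg, rfl⟩ := mem_pushNbrs.mp hz
  rw [absRound_eq]
  exact absRoundGo_covers grid n m c dirs s d hd hg

-- properties of one whole frontier pass
theorem roundF_mono (grid : List (List Int)) (n m : Int) :
    ∀ (cur : List (Int × Int)) (S : Finset (Int × Int)) (L : List (Int × Int)),
      (∀ x ∈ S, x ∈ (cur.foldl (absRound grid n m) (S, L)).1) ∧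
      (∀ z ∈ L, z ∈ (cur.foldl (absRound grid n m) (S, L)).2) := by
  intro cur
  induction cur with
  | nil => intro S L; exact ⟨fun x h => h, fun z h => h⟩
  | cons c cur ih =>
    intro S L
    simp only [List.foldl_cons]
    have h1 := absRoundGo_mono grid n m c dirs (S, L)
    rw [← absRound_eq] at h1
    obtain ⟨ihs, ihl⟩ := ih (absRound grid n m (S, L) c).1 (absRound grid n m (S, L) c).2
    constructor
    · intro x hx
      exact ihs x (h1.1 x hx)
    · intro z hz
      exact ihl z (h1.2 z hz)

theorem roundF_new (grid : List (List Int)) (n m : Int) :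
    ∀ (cur : List (Int × Int)) (S : Finset (Int × Int)) (L : List (Int × Int)),
      ∀ x ∈ (cur.foldl (absRound grid n m) (S, L)).1,
        x ∈ S ∨ ((∃ c ∈ cur, x ∈ pushNbrs grid n m c) ∧
                  x ∈ (cur.foldl (absRound grid n m) (S, L)).2) := by
  intro cur
  induction cur with
  | nil => intro S L x hx; exact Or.inl hx
  | cons c cur ih =>
    intro S L x hx
    simp only [List.foldl_cons] at hx ⊢
    rcases ih _ _ x hx with hx1 | ⟨⟨c', hc', hpn⟩, hx2⟩
    · have := absRoundGo_new grid n m c dirs (fun _ h => h) (S, L) x (by rw [← absRound_eq]; exact hx1)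
      rw [← absRound_eq] at this
      rcases this with hxS | ⟨hpn, hx2⟩
      · exact Or.inl hxS
      · refine Or.inr ⟨⟨c, by simp, hpn⟩, ?_⟩
        exact (roundF_mono grid n m cur _ _).2 x hx2
    · exact Or.inr ⟨⟨c', by simp [hc'], hpn⟩, hx2⟩

theorem roundF_P3 (grid : List (List Int)) (n m : Int) :
    ∀ (cur : List (Int × Int)) (S : Finset (Int × Int)) (L : List (Int × Int)),
      ∀ z ∈ (cur.foldl (absRound grid n m) (S, L)).2,
        z ∈ L ∨ z ∈ (cur.foldl (absRound grid n m) (S, L)).1 := by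
  intro cur
  induction cur with
  | nil => intro S L z hz; exact Or.inl hz
  | cons c cur ih =>
    intro S L z hz
    simp only [List.foldl_cons] at hz ⊢
    rcases ih _ _ z hz with hz1 | hz2
    · have := absRoundGo_frontier grid n m c dirs (S, L) z (by rw [← absRound_eq]; exact hz1)
      rw [← absRound_eq] at this
      rcases this with hzL | hz3
      · exact Or.inl hzL
      · exact Or.inr ((roundF_mono grid n m cur _ _).1 z hz3)
    · exact Or.inr hz2

theorem roundF_P5 (grid : List (List Int)) (n m : Int) :
    ∀ (cur : List (Int × Int)) (S : Finset (Int × Int)) (L : List (Int × Int)),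
      ∀ c ∈ cur, ∀ z ∈ pushNbrs grid n m c, z ∈ (cur.foldl (absRound grid n m) (S, L)).1 := by
  intro cur
  induction cur with
  | nil => intro S L c hc; simp at hc
  | cons c0 cur ih =>
    intro S L c hc z hz
    simp only [List.foldl_cons]
    rcases List.mem_cons.mp hc with rfl | hc'
    · exact (roundF_mono grid n m cur _ _).1 z (pushNbrs_covers grid n m c (S, L) z hz)
    · exact ih _ _ c hc' z hz

theorem absLoop_mono (grid : List (List Int)) (n m : Int) :
    ∀ (K : Nat) (S : Finset (Int × Int)) (cur : List (Int × Int)),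
      (box n m \ S).card + cur.length ≤ K →
      ∀ x ∈ S, x ∈ absLoop grid n m S cur := by
  intro K
  induction K with
  | zero =>
    intro S cur h x hx
    have : cur = [] := by cases cur with | nil => rfl | cons a l => simp at h
    subst this
    rw [absLoop.eq_def]
    simpa using hx
  | succ K ihK =>
    intro S cur h x hx
    by_cases hcur : cur = []
    · subst hcur
      rw [absLoop.eq_def]
      simpa using hx
    · rw [absLoop.eq_def, if_neg hcur]
      dsimp only
      apply ihK
      · have hmu := absRound_mu grid n m cur (S, [])
        have hlen : 0 < cur.length := List.length_pos_of_ne_nil hcur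
        simp only [List.length_nil] at hmu
        omega
      · exact (roundF_mono grid n m cur S []).1 x hx

-- ---- Python wraparound (negative in-range indices) ----
def wnorm (n i : Int) : Int := if i < 0 then i + n else i

theorem pyIdx?_wnorm (len : Nat) (i : Int) (h1 : -(len : Int) ≤ i) (h2 : i < (len : Int)) :
    PySem.List.pyIdx? len i = some (wnorm len i).toNat := by
  simp only [PySem.List.pyIdx?, wnorm]
  split_ifs <;> (try omega) <;> congr 1 <;> omega

theorem wnorm_nonneg {n i : Int} (h1 : -n ≤ i) (h2 : i < n) : 0 ≤ wnorm n i ∧ wnorm n i < n := by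
  unfold wnorm
  split_ifs <;> omega

theorem pyGet?_wnorm {α : Type} (xs : List α) (i : Int)
    (h1 : -(xs.length : Int) ≤ i) (h2 : i < (xs.length : Int)) :
    PySem.List.pyGet? xs i = xs[(wnorm xs.length i).toNat]? := by
  unfold PySem.List.pyGet?
  rw [pyIdx?_wnorm _ _ h1 h2]
  rfl

theorem pySetD_wnorm {α : Type} (xs : List α) (i : Int) (v : α)
    (h1 : -(xs.length : Int) ≤ i) (h2 : i < (xs.length : Int)) :
    PySem.List.pySetD xs i v = xs.set (wnorm xs.length i).toNat v :=
  pySetD_idx xs i v _ (pyIdx?_wnorm _ _ h1 h2)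

theorem render_length (n m : Int) (S : Finset (Int × Int)) :
    (render n m S).length = n.toNat := by simp [render]

theorem render_row_wrap (n m : Int) (S : Finset (Int × Int)) (i : Int)
    (h1 : -n ≤ i) (h2 : i < n) :
    PySem.List.pyGet? (render n m S) i
      = some ((List.range m.toNat).map (fun jj : Nat => if (wnorm n i, (jj : Int)) ∈ S then 1 else 0)) := by
  obtain ⟨hw1, hw2⟩ := wnorm_nonneg h1 h2
  have hiN : (wnorm n i).toNat < n.toNat := by omega
  rw [pyGet?_wnorm _ _ (by simp [render_length]; omega) (by simp [render_length]; omega)]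
  have : wnorm ((render n m S).length : Int) i = wnorm n i := by
    rw [render_length]; unfold wnorm; split_ifs <;> omega
  rw [this]
  unfold render
  rw [List.getElem?_map, List.getElem?_range hiN]
  simp [Int.toNat_of_nonneg hw1]

theorem render_get_wrap (n m : Int) (S : Finset (Int × Int)) (i j : Int)
    (h1 : -n ≤ i) (h2 : i < n) (h3 : -m ≤ j) (h4 : j < m) :
    pyGet2? (render n m S) i j = some (if (wnorm n i, wnorm m j) ∈ S then 1 else 0) := by
  obtain ⟨hw3, hw4⟩ := wnorm_nonneg h3 h4
  have hjN : (wnorm m j).toNat < m.toNat := by omega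
  rw [pyGet2?_row _ _ _ _ (render_row_wrap n m S i h1 h2)]
  rw [pyGet?_wnorm _ _ (by simp; omega) (by simp; omega)]
  have hln : wnorm (((List.range m.toNat).map
      (fun jj : Nat => if (wnorm n i, (jj : Int)) ∈ S then (1 : Int) else 0)).length : Int) j
      = wnorm m j := by
    simp only [List.length_map, List.length_range]
    unfold wnorm
    split_ifs <;> omega
  rw [hln, List.getElem?_map, List.getElem?_range hjN]
  simp [Int.toNat_of_nonneg hw3]

theorem render_set_wrap (n m : Int) (S : Finset (Int × Int)) (i j : Int)
    (h1 : -n ≤ i) (h2 : i < n) (h3 : -m ≤ j) (h4 : j < m) :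
    pySet2 (render n m S) i j 1 = render n m (insert (wnorm n i, wnorm m j) S) := by
  obtain ⟨hw1, hw2⟩ := wnorm_nonneg h1 h2
  obtain ⟨hw3, hw4⟩ := wnorm_nonneg h3 h4
  have hww : wnorm n (wnorm n i) = wnorm n i := by unfold wnorm; split_ifs <;> omega
  have hrow : PySem.List.pyGetD (render n m S) i []
      = (List.range m.toNat).map (fun jj : Nat => if (wnorm n i, (jj : Int)) ∈ S then 1 else 0) := by
    rw [PySem.List.pyGetD, render_row_wrap n m S i h1 h2]
    rfl
  have hrow2 : PySem.List.pyGetD (render n m S) (wnorm n i) []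
      = (List.range m.toNat).map (fun jj : Nat => if (wnorm n i, (jj : Int)) ∈ S then 1 else 0) := by
    have := render_row_wrap n m S (wnorm n i) (by omega) hw2
    rw [hww] at this
    rw [PySem.List.pyGetD, this]
    rfl
  have e1 : pySet2 (render n m S) i j 1 = pySet2 (render n m S) (wnorm n i) (wnorm m j) 1 := by
    unfold pySet2
    have hjw : ∀ row : List Int, row.length = m.toNat →
        PySem.List.pySetD row j 1 = PySem.List.pySetD row (wnorm m j) 1 := by
      intro row hlr
      rw [pySetD_wnorm _ _ _ (by rw [hlr]; omega) (by rw [hlr]; omega)]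
      rw [PySem.List.pySetD_of_nonneg _ _ hw3]
      have : wnorm (row.length : Int) j = wnorm m j := by
        rw [hlr]; unfold wnorm; split_ifs <;> omega
      rw [this]
    rw [hrow, hrow2, hjw _ (by simp)]
    rw [pySetD_wnorm _ _ _ (by simp [render_length]; omega) (by simp [render_length]; omega)]
    rw [PySem.List.pySetD_of_nonneg _ _ hw1]
    have : wnorm ((render n m S).length : Int) i = wnorm n i := by
      rw [render_length]; unfold wnorm; split_ifs <;> omega
    rw [this]
  rw [e1, render_set n m S _ _ hw1 hw2 hw3 hw4]

theorem simA_step_wrap (grid : List (List Int)) (n m : Int) (S : Finset (Int × Int))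
    (rest : List (Int × Int)) (c : Int × Int)
    (h1 : -n ≤ c.1) (h2 : c.1 < n) (h3 : -m ≤ c.2) (h4 : c.2 < m) :
    loopA grid n m (render n m S) (rest ++ [c]) =
      if (wnorm n c.1, wnorm m c.2) ∈ S then loopA grid n m (render n m S) rest
      else loopA grid n m (render n m (insert (wnorm n c.1, wnorm m c.2) S))
        (rest ++ pushNbrs grid n m c) := by
  rw [loopA.eq_def]
  rw [dif_neg (by simp : ¬(rest ++ [c] = []))]
  simp only [List.getLast_concat, List.dropLast_concat]
  split
  · rename_i hv
    rw [List.getLast_concat] at hv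
    rw [render_get_wrap n m S c.1 c.2 h1 h2 h3 h4] at hv
    simp at hv
  · rename_i t hv
    rw [List.getLast_concat] at hv
    rw [render_get_wrap n m S c.1 c.2 h1 h2 h3 h4] at hv
    rw [Option.some_inj] at hv
    by_cases hmem : (wnorm n c.1, wnorm m c.2) ∈ S
    · rw [if_pos hmem] at hv
      rw [if_pos hmem, dif_pos (by omega : t ≠ 0)]
    · rw [if_neg hmem] at hv
      rw [if_neg hmem, dif_neg (by omega : ¬ t ≠ 0)]
      rw [render_set_wrap n m S c.1 c.2 h1 h2 h3 h4]

-- processing an in-box segment on top of the stack completes its closure first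
theorem simA_seg (grid : List (List Int)) (n m : Int) :
    ∀ (K : Nat) (S : Finset (Int × Int)), (box n m \ S).card ≤ K →
    ∀ (P T : List (Int × Int)), (∀ c ∈ P, c ∈ box n m) →
      loopA grid n m (render n m S) (T ++ P)
        = loopA grid n m (render n m (execA grid n m S P.reverse)) T := by
  intro K
  induction K with
  | zero =>
    intro S hS P
    induction P using List.reverseRecOn with
    | nil => intro _; simp [execA]
    | append_singleton P' c ihP =>
      intro T hbox
      have hcb : c ∈ box n m := hbox c (by simp)
      have hrb : ∀ z ∈ P', z ∈ box n m := fun z hz => hbox z (by simp [hz])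
      have hmem : c ∈ S := by
        by_contra hcs
        have hb : c ∈ box n m \ S := Finset.mem_sdiff.mpr ⟨hcb, hcs⟩
        have := Finset.card_pos.mpr ⟨_, hb⟩
        omega
      rw [← List.append_assoc, simA_step grid n m S (T ++ P') c hcb, if_pos hmem]
      rw [List.reverse_append, List.reverse_cons, List.reverse_nil, List.nil_append,
        List.singleton_append]
      rw [execA, if_pos (Or.inl hmem)]
      exact ihP T hrb
  | succ K ihK =>
    intro S hS P
    induction P using List.reverseRecOn with
    | nil => intro _; simp [execA]
    | append_singleton P' c ihP =>
      intro T hbox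
      have hcb : c ∈ box n m := hbox c (by simp)
      have hrb : ∀ z ∈ P', z ∈ box n m := fun z hz => hbox z (by simp [hz])
      rw [← List.append_assoc, simA_step grid n m S (T ++ P') c hcb]
      rw [List.reverse_append, List.reverse_cons, List.reverse_nil, List.nil_append,
        List.singleton_append]
      by_cases hmem : c ∈ S
      · rw [if_pos hmem, execA, if_pos (Or.inl hmem)]
        exact ihP T hrb
      · rw [if_neg hmem, execA, if_neg (by rw [not_or, not_not]; exact ⟨hmem, hcb⟩)]
        have hbox' : ∀ z ∈ P' ++ pushNbrs grid n m c, z ∈ box n m := by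
          intro z hz
          rcases List.mem_append.mp hz with hz | hz
          · exact hrb z hz
          · exact pushNbrs_box hz
        have := ihK (insert c S) (card_after_insert hcb hmem hS) (P' ++ pushNbrs grid n m c) T hbox'
        rw [List.append_assoc, this, List.reverse_append]

-- per-seed abstract steps: A explores the seed's stack closure, B its frontier closure
noncomputable def seedA (grid : List (List Int)) (n m : Int)
    (S : Finset (Int × Int)) (c : Int × Int) : Finset (Int × Int) :=
  if (wnorm n c.1, wnorm m c.2) ∈ S then S
  else execA grid n m (insert (wnorm n c.1, wnorm m c.2) S) ((pushNbrs grid n m c).reverse)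

noncomputable def seedB (grid : List (List Int)) (n m : Int)
    (S : Finset (Int × Int)) (c : Int × Int) : Finset (Int × Int) :=
  if (wnorm n c.1, wnorm m c.2) ∈ S then S
  else absLoop grid n m (insert (wnorm n c.1, wnorm m c.2) S) [c]

-- A's whole loop is the right-to-left fold of per-seed closures
theorem simA_seeds (grid : List (List Int)) (n m : Int) :
    ∀ (dq : List (Int × Int)),
      (∀ c ∈ dq, -n ≤ c.1 ∧ c.1 < n ∧ -m ≤ c.2 ∧ c.2 < m) →
      ∀ (S : Finset (Int × Int)),
      loopA grid n m (render n m S) dq = render n m (dq.reverse.foldl (seedA grid n m) S) := by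
  intro dq
  induction dq using List.reverseRecOn with
  | nil => intro _ S; rw [loopA.eq_def]; simp
  | append_singleton rest c ihr =>
    intro hb S
    obtain ⟨h1, h2, h3, h4⟩ := hb c (by simp)
    have hrb : ∀ z ∈ rest, -n ≤ z.1 ∧ z.1 < n ∧ -m ≤ z.2 ∧ z.2 < m :=
      fun z hz => hb z (by simp [hz])
    rw [simA_step_wrap grid n m S rest c h1 h2 h3 h4]
    rw [List.reverse_append, List.reverse_cons, List.reverse_nil, List.nil_append,
      List.singleton_append, List.foldl_cons]
    by_cases hmem : (wnorm n c.1, wnorm m c.2) ∈ S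
    · rw [if_pos hmem, ihr hrb]
      unfold seedA
      rw [if_pos hmem]
    · rw [if_neg hmem]
      have hseg := simA_seg grid n m
        ((box n m \ insert (wnorm n c.1, wnorm m c.2) S).card)
        (insert (wnorm n c.1, wnorm m c.2) S) le_rfl (pushNbrs grid n m c) rest
        (fun z hz => pushNbrs_box hz)
      rw [hseg, ihr hrb]
      unfold seedA
      rw [if_neg hmem]

-- reachability from an already-marked start through unmarked cells (at least one step)
inductive RB (grid : List (List Int)) (n m : Int) (S : Finset (Int × Int)) :
    (Int × Int) → (Int × Int) → Prop where
  | base (s z : Int × Int) (hz : z ∈ pushNbrs grid n m s) (hns : z ∉ S) : RB grid n m S s z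
  | step (s b z : Int × Int) (hb : RB grid n m S s b) (hz : z ∈ pushNbrs grid n m b)
      (hns : z ∉ S) : RB grid n m S s z

theorem RB_out {grid : List (List Int)} {n m : Int} {S : Finset (Int × Int)} {s x : Int × Int}
    (h : RB grid n m S s x) : x ∉ S := by
  induction h with
  | base z hz hns => exact hns
  | step b z hb hz hns ih => exact hns

theorem RB_iff_RA {grid : List (List Int)} {n m : Int} {S : Finset (Int × Int)} {c x : Int × Int} :
    RB grid n m S c x ↔ ∃ s ∈ pushNbrs grid n m c, RA grid n m S s x := by
  constructor
  · intro h
    induction h with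
    | base s hz hns => exact ⟨s, hz, RA.base s (pushNbrs_box hz) hns⟩
    | step b z hb hz hns ih =>
      obtain ⟨s', hs', hra⟩ := ih
      exact ⟨s', hs', RA.step _ _ _ hra hz hns⟩
  · rintro ⟨s, hs, hra⟩
    induction hra with
    | base hbox hns => exact RB.base _ _ hs hns
    | step b z hb hz hns ih => exact RB.step _ _ _ ih hz hns

theorem absRoundGo_fresh (grid : List (List Int)) (n m : Int) (c : Int × Int) :
    ∀ (ds : List (Int × Int)) (s : Finset (Int × Int) × List (Int × Int))
      (T : Finset (Int × Int)), (∀ x ∈ T, x ∈ s.1) →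
      ∀ z ∈ (absRoundGo grid n m c ds s).2, z ∈ s.2 ∨ z ∉ T := by
  intro ds
  induction ds with
  | nil => intro s T _ z hz; exact Or.inl hz
  | cons d ds ih =>
    intro s T hT z hz
    unfold absRoundGo at hz
    simp only [List.foldl_cons] at hz
    by_cases hg : (validP n m (c.1 + d.1) (c.2 + d.2) &&
        decide ((pyGet2? grid c.1 c.2).getD 0 ≤ (pyGet2? grid (c.1 + d.1) (c.2 + d.2)).getD 0)) = true
       ∧ (c.1 + d.1, c.2 + d.2) ∉ s.1
    · rw [if_pos hg] at hz
      have hT' : ∀ x ∈ T, x ∈ (insert (c.1 + d.1, c.2 + d.2) s.1 : Finset (Int × Int)) :=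
        fun x hx => Finset.mem_insert_of_mem (hT x hx)
      rcases ih _ T hT' z hz with hz1 | hz2
      · rcases List.mem_append.mp hz1 with hz1 | hz1
        · exact Or.inl hz1
        · simp only [List.mem_singleton] at hz1
          subst hz1
          exact Or.inr (fun hmem => hg.2 (hT _ hmem))
      · exact Or.inr hz2
    · rw [if_neg hg] at hz
      exact ih _ T hT z hz

theorem roundF_fresh (grid : List (List Int)) (n m : Int) :
    ∀ (cur : List (Int × Int)) (s : Finset (Int × Int) × List (Int × Int))
      (T : Finset (Int × Int)), (∀ x ∈ T, x ∈ s.1) →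
      ∀ z ∈ (cur.foldl (absRound grid n m) s).2, z ∈ s.2 ∨ z ∉ T := by
  intro cur
  induction cur with
  | nil => intro s T _ z hz; exact Or.inl hz
  | cons c cur ih =>
    intro s T hT z hz
    simp only [List.foldl_cons] at hz
    have hmono := absRoundGo_mono grid n m c dirs s
    rw [← absRound_eq] at hmono
    have hT' : ∀ x ∈ T, x ∈ (absRound grid n m s c).1 := fun x hx => hmono.1 x (hT x hx)
    rcases ih _ T hT' z hz with hz1 | hz2
    · have := absRoundGo_fresh grid n m c dirs s T hT z (by rw [← absRound_eq]; exact hz1)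
      exact this
    · exact Or.inr hz2

theorem absLoop_sound2 (grid : List (List Int)) (n m : Int) (S₀ : Finset (Int × Int))
    (P : (Int × Int) → Prop)
    (hP : ∀ b z, P b → z ∈ pushNbrs grid n m b → z ∈ S₀ ∨ P z) :
    ∀ (K : Nat) (S : Finset (Int × Int)) (cur : List (Int × Int)),
      (box n m \ S).card + cur.length ≤ K →
      (∀ x ∈ S₀, x ∈ S) → (∀ x ∈ S, x ∈ S₀ ∨ P x) →
      (∀ c' ∈ cur, ∀ z ∈ pushNbrs grid n m c', z ∈ S₀ ∨ P z) →
      ∀ x ∈ absLoop grid n m S cur, x ∈ S₀ ∨ P x := by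
  intro K
  induction K with
  | zero =>
    intro S cur h _ hS _ x hx
    have : cur = [] := by cases cur with | nil => rfl | cons a l => simp at h
    subst this
    rw [absLoop.eq_def] at hx
    simp at hx
    exact hS x hx
  | succ K ihK =>
    intro S cur h hS0 hS hfr x hx
    by_cases hc : cur = []
    · subst hc
      rw [absLoop.eq_def] at hx
      simp at hx
      exact hS x hx
    · rw [absLoop.eq_def, if_neg hc] at hx
      dsimp only at hx
      refine ihK _ _ ?_ ?_ ?_ ?_ x hx
      · have hmu := absRound_mu grid n m cur (S, [])
        have hlen : 0 < cur.length := List.length_pos_of_ne_nil hc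
        simp only [List.length_nil] at hmu
        omega
      · exact fun y hy => (roundF_mono grid n m cur S []).1 y (hS0 y hy)
      · intro y hy
        rcases roundF_new grid n m cur S [] y hy with hyS | ⟨⟨c', hc', hpn⟩, _⟩
        · exact hS y hyS
        · exact hfr c' hc' y hpn
      · intro y hy z hz
        have hyfresh : y ∉ S₀ := by
          rcases roundF_fresh grid n m cur (S, []) S₀ hS0 y hy with h0 | h0
          · simp at h0
          · exact h0
        have hy1 : y ∈ (cur.foldl (absRound grid n m) (S, [])).1 := by
          rcases roundF_P3 grid n m cur S [] y hy with h0 | h0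
          · simp at h0
          · exact h0
        rcases roundF_new grid n m cur S [] y hy1 with hyS | ⟨⟨c', hc', hpn⟩, _⟩
        · rcases hS y hyS with h0 | h0
          · exact absurd h0 hyfresh
          · exact hP y z h0 hz
        · rcases hfr c' hc' y hpn with h0 | h0
          · exact absurd h0 hyfresh
          · exact hP y z h0 hz

theorem RB_round (grid : List (List Int)) (n m : Int) (cur : List (Int × Int))
    (S : Finset (Int × Int)) :
    ∀ s ∈ cur, ∀ x, RB grid n m S s x →
      x ∈ (cur.foldl (absRound grid n m) (S, [])).1 ∨
      ∃ s' ∈ (cur.foldl (absRound grid n m) (S, [])).2,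
        RB grid n m (cur.foldl (absRound grid n m) (S, [])).1 s' x := by
  intro s hs x hrb
  induction hrb with
  | base s0 hz hns =>
    exact Or.inl (roundF_P5 grid n m cur S [] _ hs _ hz)
  | step b z hb hz hns ih =>
    by_cases hzY : z ∈ (cur.foldl (absRound grid n m) (S, [])).1
    · exact Or.inl hzY
    · rcases ih with hbY | ⟨s', hs', hrb'⟩
      · have hbS : b ∉ S := RB_out hb
        have hb2 : b ∈ (cur.foldl (absRound grid n m) (S, [])).2 := by
          rcases roundF_new grid n m cur S [] b hbY with h0 | ⟨_, h0⟩
          · exact absurd h0 hbS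
          · exact h0
        exact Or.inr ⟨b, hb2, RB.base _ _ hz hzY⟩
      · exact Or.inr ⟨s', hs', RB.step _ _ _ hrb' hz hzY⟩

theorem absLoop_geq (grid : List (List Int)) (n m : Int) :
    ∀ (K : Nat) (S : Finset (Int × Int)) (cur : List (Int × Int)),
      (box n m \ S).card + cur.length ≤ K →
      ∀ s ∈ cur, ∀ x, RB grid n m S s x → x ∈ absLoop grid n m S cur := by
  intro K
  induction K with
  | zero =>
    intro S cur h s hs x _
    have : cur = [] := by cases cur with | nil => rfl | cons a l => simp at h
    subst this
    simp at hs
  | succ K ihK =>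
    intro S cur h s hs x hrb
    have hc : cur ≠ [] := by rintro rfl; simp at hs
    rw [absLoop.eq_def, if_neg hc]
    dsimp only
    have hmeas : (box n m \ (cur.foldl (absRound grid n m) (S, [])).1).card +
        (cur.foldl (absRound grid n m) (S, [])).2.length ≤ K := by
      have hmu := absRound_mu grid n m cur (S, [])
      have hlen : 0 < cur.length := List.length_pos_of_ne_nil hc
      simp only [List.length_nil] at hmu
      omega
    rcases RB_round grid n m cur S s hs x hrb with hx | ⟨s', hs', hrb'⟩
    · exact absLoop_mono grid n m _ _ _ hmeas x hx
    · exact ihK _ _ hmeas s' hs' x hrb'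

-- the crux: one source's frontier expansion equals A's stack expansion of the same source
theorem perSeed (grid : List (List Int)) (n m : Int) (S : Finset (Int × Int)) (c : Int × Int) :
    absLoop grid n m S [c] = execA grid n m S ((pushNbrs grid n m c).reverse) := by
  apply Finset.ext
  intro x
  rw [charA grid n m _ S le_rfl]
  constructor
  · intro hx
    have hsnd := absLoop_sound2 grid n m S (fun y => RB grid n m S c y)
      (fun b z hb hz => by
        by_cases hzS : z ∈ S
        · exact Or.inl hzS
        · exact Or.inr (RB.step _ _ _ hb hz hzS))
      ((box n m \ S).card + 1) S [c] le_rfl (fun y hy => hy) (fun y hy => Or.inl hy)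
      (fun c' hc' z hz => by
        simp only [List.mem_singleton] at hc'
        subst hc'
        by_cases hzS : z ∈ S
        · exact Or.inl hzS
        · exact Or.inr (RB.base _ _ hz hzS))
      x hx
    rcases hsnd with hxS | hxRB
    · exact Or.inl hxS
    · obtain ⟨s, hs, hra⟩ := RB_iff_RA.mp hxRB
      exact Or.inr ⟨s, List.mem_reverse.mpr hs, hra⟩
  · rintro (hx | ⟨s, hs, hra⟩)
    · exact absLoop_mono grid n m ((box n m \ S).card + 1) S [c] le_rfl x hx
    · have hrb : RB grid n m S c x := RB_iff_RA.mpr ⟨s, List.mem_reverse.mp hs, hra⟩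
      exact absLoop_geq grid n m ((box n m \ S).card + 1) S [c] le_rfl c (by simp) x hrb

theorem seedA_eq_seedB (grid : List (List Int)) (n m : Int) :
    ∀ (seeds : List (Int × Int)) (S : Finset (Int × Int)),
      seeds.foldl (seedA grid n m) S = seeds.foldl (seedB grid n m) S := by
  intro seeds
  induction seeds with
  | nil => intro S; rfl
  | cons c seeds ih =>
    intro S
    simp only [List.foldl_cons]
    have : seedA grid n m S c = seedB grid n m S c := by
      unfold seedA seedB
      by_cases hm : (wnorm n c.1, wnorm m c.2) ∈ S
      · rw [if_pos hm, if_pos hm]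
      · rw [if_neg hm, if_neg hm, perSeed]
    rw [this, ih]

-- B's outer loop by descending index is the right-to-left fold over pos
theorem idx_fold (f : List (List Int) → (Int × Int) → List (List Int)) :
    ∀ (ps : List (Int × Int)) (v0 : List (List Int)),
      (PySem.List.pyRange ((ps.length : Int) - 1) (-1) (-1)).foldl
        (fun v k => f v (PySem.List.pyGetD ps k (0, 0))) v0
      = ps.reverse.foldl f v0 := by
  intro ps
  induction ps using List.reverseRecOn with
  | nil => intro v0; simp [PySem.List.pyRange_neg_one]
  | append_singleton ys z ih =>
    intro v0
    have hlen : ((ys ++ [z]).length : Int) - 1 = (ys.length : Int) := by simp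
    rw [hlen, PySem.List.pyRange_neg_one_cons (by omega : (-1 : Int) < (ys.length : Int))]
    rw [List.foldl_cons]
    have hz : PySem.List.pyGetD (ys ++ [z]) ((ys.length : Int)) ((0 : Int), (0 : Int)) = z := by
      rw [PySem.List.pyGetD_eq_getElem _ _ (by omega) (by simp)]
      simp
    rw [hz]
    have hcong : List.foldl (fun v k => f v (PySem.List.pyGetD (ys ++ [z]) k (0, 0))) (f v0 z)
          (PySem.List.pyRange ((ys.length : Int) - 1) (-1) (-1))
        = List.foldl (fun v k => f v (PySem.List.pyGetD ys k (0, 0))) (f v0 z)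
          (PySem.List.pyRange ((ys.length : Int) - 1) (-1) (-1)) := by
      apply PySem.List.foldl_congr_mem
      intro acc k hk
      rw [PySem.List.mem_pyRange_neg_one] at hk
      have h0 : (0 : Int) ≤ k := by omega
      have h1 : k < (ys.length : Int) := by omega
      rw [PySem.List.pyGetD_eq_getElem _ _ h0 (by simp; omega),
          PySem.List.pyGetD_eq_getElem _ _ h0 (by exact_mod_cast h1)]
      rw [List.getElem_append_left (by omega)]
    rw [hcong, ih (f v0 z)]
    rw [List.reverse_append]
    simp

-- B's whole source loop is the same right-to-left fold of per-seed closures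
theorem simB_seeds (grid : List (List Int)) (n m : Int) :
    ∀ (seeds : List (Int × Int)),
      (∀ c ∈ seeds, -n ≤ c.1 ∧ c.1 < n ∧ -m ≤ c.2 ∧ c.2 < m) →
      ∀ (S : Finset (Int × Int)),
      seeds.foldl (fun v c =>
        if vget v c 1 ≠ 0 then v
        else floodB grid n m (vmark v c) [c]) (render n m S)
      = render n m (seeds.foldl (seedB grid n m) S) := by
  intro seeds
  induction seeds with
  | nil => intro _ S; rfl
  | cons c seeds ih =>
    intro hb S
    obtain ⟨h1, h2, h3, h4⟩ := hb c (by simp)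
    have hrb : ∀ z ∈ seeds, -n ≤ z.1 ∧ z.1 < n ∧ -m ≤ z.2 ∧ z.2 < m :=
      fun z hz => hb z (by simp [hz])
    simp only [List.foldl_cons]
    by_cases hm : (wnorm n c.1, wnorm m c.2) ∈ S
    · have hrd : vget (render n m S) c 1 = 1 := by
        rw [vget_eq, render_get_wrap n m S c.1 c.2 h1 h2 h3 h4, if_pos hm]
        rfl
      rw [hrd, if_pos (show (1 : Int) ≠ 0 by norm_num)]
      rw [ih hrb]
      unfold seedB
      rw [if_pos hm]
    · have hrd : vget (render n m S) c 1 = 0 := by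
        rw [vget_eq, render_get_wrap n m S c.1 c.2 h1 h2 h3 h4, if_neg hm]
        rfl
      rw [hrd, if_neg (show ¬(0 : Int) ≠ 0 by norm_num)]
      rw [vmark_eq, render_set_wrap n m S c.1 c.2 h1 h2 h3 h4]
      rw [floodB_eq_loopB grid n m
        (cz (render n m (insert (wnorm n c.1, wnorm m c.2) S)) + 1) _ [c] (by simp)]
      rw [simLoopB grid n m ((box n m \ insert (wnorm n c.1, wnorm m c.2) S).card + 1)
        _ [c] (by simp)]
      rw [ih hrb]
      unfold seedB
      rw [if_neg hm]

-- ===== VERDICT =====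
theorem BFS_spec : Claim_equal_BFS := by
  unfold Claim_equal_BFS
  intro grid pos _ hpre
  unfold Spec_BFS
  obtain ⟨hne, _, hposb⟩ := hpre
  simp only [BFS, BFS_alt]
  have hm0 : (grid.headD []) = (PySem.List.pyGet? grid 0).getD [] := by
    cases grid with
    | nil => exact absurd rfl hne
    | cons r g => simp [PySem.List.pyGet?_zero_cons]
  have hwrap : ∀ c ∈ pos, -((grid.length : Int)) ≤ c.1 ∧ c.1 < (grid.length : Int) ∧
      -((((PySem.List.pyGet? grid 0).getD []).length : Int)) ≤ c.2 ∧
      c.2 < ((((PySem.List.pyGet? grid 0).getD []).length : Int)) := by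
    intro c hc
    obtain ⟨g1, g2, g3, g4⟩ := hposb c hc
    rw [hm0] at g3 g4
    exact ⟨g1, g2, g3, g4⟩
  have hwrapr : ∀ c ∈ pos.reverse, -((grid.length : Int)) ≤ c.1 ∧ c.1 < (grid.length : Int) ∧
      -((((PySem.List.pyGet? grid 0).getD []).length : Int)) ≤ c.2 ∧
      c.2 < ((((PySem.List.pyGet? grid 0).getD []).length : Int)) :=
    fun c hc => hwrap c (List.mem_reverse.mp hc)
  rw [render_empty, render_empty_B]
  rw [simA_seeds grid _ _ pos hwrap ∅]
  have hB := idx_fold (fun v s =>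
    if vget v s 1 ≠ 0 then v
    else floodB grid (grid.length : Int) (((PySem.List.pyGet? grid 0).getD []).length : Int)
      (vmark v s) [s]) pos
    (render (grid.length : Int) (((PySem.List.pyGet? grid 0).getD []).length : Int) ∅)
  beta_reduce at hB
  rw [hB]
  rw [simB_seeds grid _ _ pos.reverse hwrapr ∅]
  rw [seedA_eq_seedB]
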